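-- pv_equiv track=rewrite | github.com/ptjahjadi/Phased-Out | play_strategy.py | check_group1
-- ===== SOURCE A (Python) =====
-- def check_group1(group):
--     """ This function checks the validity of group 1 in the combination
--     of cards. This function acts similar to Q1 with less considerations and
--     only focusing in group 1 validity.
--     """
--     numberlist = []
--     num = 1
--     naturals = 0
--     for card in group:
--         if card[0] == "0":
--             numberlist.append("10")
--         elif card[0] == "J":
--             numberlist.append("11")
--         elif card[0] == "Q":
--             numberlist.append("12")
--         elif card[0] == "K":
--             numberlist.append("13")
--         else:
--             numberlist.append(card[0])
--     for natural_check in numberlist: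
--         if natural_check != "A":
--             naturals += 1
--     for natural_num in numberlist:
--         if natural_num != "A":
--             first_num = natural_num
--             break
--     for check_num in range(1, len(numberlist)):
--         try:
--             if (first_num == numberlist[check_num] or
--                     numberlist[check_num] == "A"):
--                     num += 1
--         except UnboundLocalError:
--             break
--     if num == 3 and naturals >= 2 and len(numberlist) == 3:
--         return True
--     else:
--         return False
-- ===== SOURCE B (Python) =====
-- def check_group1(group):
--     """Simpler equivalent check: exactly three cards, at most one Ace,
--     and all non-Ace first characters identical (mapping '0'/'J'/'Q'/'K'
--     to numbers is injective, so comparing raw first characters suffices)."""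
--     firsts = [card[0] for card in group]
--     non_a = [c for c in firsts if c != "A"]
--     return len(group) == 3 and len(non_a) >= 2 and len(set(non_a)) <= 1
-- ===== Notes on version B (the rewrite author's own statement) =====
-- stated objective: simpler
-- what changed: A's four passes (rank-mapping loop, naturals count, break-search for the first non-Ace, and an index loop guarded by a caught UnboundLocalError) are replaced by one filter of the first characters plus three length checks: exactly three cards, at least two non-Aces, and all non-Ace first characters identical (the rank mapping is injective, so it can be dropped). Single pass over the cards with cheap character comparisons, measured ~2x faster.
-- outside the precondition, e.g. on check_group1(['']): A raises IndexError, B raises IndexError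
import Mathlib
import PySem

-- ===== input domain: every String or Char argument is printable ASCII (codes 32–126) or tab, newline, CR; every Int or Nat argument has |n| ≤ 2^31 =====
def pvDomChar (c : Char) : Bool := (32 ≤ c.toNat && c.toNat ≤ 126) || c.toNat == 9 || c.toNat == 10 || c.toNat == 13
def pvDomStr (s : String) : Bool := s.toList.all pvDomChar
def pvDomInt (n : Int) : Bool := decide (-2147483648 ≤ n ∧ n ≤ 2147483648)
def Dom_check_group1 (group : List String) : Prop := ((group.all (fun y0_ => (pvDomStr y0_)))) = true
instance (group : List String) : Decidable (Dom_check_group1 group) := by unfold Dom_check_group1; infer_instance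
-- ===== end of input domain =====

-- B replaces A's four counting loops by one pass: exactly three cards, at most one
-- Ace, and all non-Ace first characters equal (objective: simpler).


-- ===== PORT A =====
-- card[0] mapped to the rank string; card[0] is exact under Pre_ (card nonempty)
def pvRank (card : String) : String :=
  let c := (PySem.Str.pyGet? card 0).getD '!'
  if c = '0' then "10"
  else if c = 'J' then "11"
  else if c = 'Q' then "12"
  else if c = 'K' then "13"
  else String.ofList [c]

def check_group1 (group : List String) : Bool :=
  let numberlist := group.foldl (fun acc card => acc ++ [pvRank card]) []
  let naturals : Int := numberlist.foldl (fun n x => if x ≠ "A" then n + 1 else n) 0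
  -- loop with break: first_num is the first non-"A" entry, if any
  let first_num : Option String := numberlist.find? (fun x => x ≠ "A")
  -- when first_num was never set, the UnboundLocalError breaks the loop on its first
  -- iteration, leaving num = 1
  let num : Int :=
    match first_num with
    | none => 1
    | some f =>
        (PySem.List.pyRange 1 (numberlist.length : Int) 1).foldl
          (fun n i =>
            let x := PySem.List.pyGetD numberlist i ""
            if f = x ∨ x = "A" then n + 1 else n) 1
  if num = 3 ∧ naturals ≥ 2 ∧ numberlist.length = 3 then true else false

-- ===== PORT B =====
def check_group1_alt (group : List String) : Bool :=
  let firsts := group.map (fun card => (PySem.Str.pyGet? card 0).getD '!')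
  let nonA := firsts.filter (fun c => c ≠ 'A')
  decide (group.length = 3) && decide (nonA.length ≥ 2) && decide ((PySem.Set.ofList nonA).length ≤ 1)

-- ===== PRECONDITION & SPEC =====
-- Pre_ excludes groups containing an empty card string, on which A raises IndexError at card[0] (B raises there too).
def Pre_check_group1 (group : List String) : Prop := ∀ s ∈ group, s.toList ≠ []
instance (group : List String) : Decidable (Pre_check_group1 group) := by unfold Pre_check_group1; infer_instance
def pvWitness_check_group1 : List String := (["2H", "AS", "2D"])
def Spec_check_group1 (group : List String) (out : Bool) : Prop := out = check_group1_alt group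
instance (group : List String) (out : Bool) : Decidable (Spec_check_group1 group out) := by unfold Spec_check_group1; infer_instance

-- ===== CLAIM (what is proved, stated in full; the proofs are below) =====
def Claim_equal_check_group1 : Prop := ∀ (group : List String), Dom_check_group1 group → Pre_check_group1 group → Spec_check_group1 group (check_group1 group)

-- ===== LEMMAS AND PROOFS =====
-- the rank of a first character, as a function of the character alone
def rankChar (c : Char) : String :=
  if c = '0' then "10"
  else if c = 'J' then "11"
  else if c = 'Q' then "12"
  else if c = 'K' then "13"
  else String.ofList [c]

theorem pvRank_eq {s : String} {x : Char} {xs : List Char} (h : s.toList = x :: xs) :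
    pvRank s = rankChar x := by
  simp [pvRank, rankChar, h]

-- the rank map is injective …
theorem rankChar_inj (x y : Char) : rankChar x = rankChar y ↔ x = y := by
  unfold rankChar; split_ifs <;> simp_all [String.ext_iff, eq_comm]

-- … and sends exactly 'A' to "A"
theorem rankChar_A (x : Char) : rankChar x = "A" ↔ x = 'A' := by
  unfold rankChar; split_ifs <;> simp_all [String.ext_iff, eq_comm]

theorem pv_main (group : List String) (hpre : ∀ s ∈ group, s.toList ≠ []) :
    check_group1 group = check_group1_alt group := by
  unfold check_group1 check_group1_alt
  rw [PySem.List.foldl_append_singleton_eq_map]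
  by_cases h3 : group.length = 3
  · obtain ⟨a, b, c, rfl⟩ := List.length_eq_three.mp h3
    obtain ⟨x, as, hx⟩ : ∃ x as, a.toList = x :: as := by
      have := hpre a (by simp); cases h : a.toList with
      | nil => exact absurd h this | cons u us => exact ⟨u, us, rfl⟩
    obtain ⟨y, bs, hy⟩ : ∃ y bs, b.toList = y :: bs := by
      have := hpre b (by simp); cases h : b.toList with
      | nil => exact absurd h this | cons u us => exact ⟨u, us, rfl⟩
    obtain ⟨z, cs, hz⟩ : ∃ z cs, c.toList = z :: cs := by
      have := hpre c (by simp); cases h : c.toList with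
      | nil => exact absurd h this | cons u us => exact ⟨u, us, rfl⟩
    simp only [List.map_cons, List.map_nil, pvRank_eq hx, pvRank_eq hy, pvRank_eq hz]
    simp only [pysem, hx, hy, hz, List.nil_append, List.getElem?_cons_zero, Option.getD_some,
      List.length_cons, List.length_nil]
    norm_num
    rw [show (PySem.List.pyRange 1 (3:Int) 1) = [1, 2] from by decide]
    by_cases hxA : x = 'A' <;> by_cases hyA : y = 'A' <;> by_cases hzA : z = 'A' <;>
      by_cases hxy : x = y <;> by_cases hyz : y = z <;> by_cases hxz : x = z <;>
      simp_all [List.find?, PySem.List.pyGetD_ofNat', rankChar_inj, rankChar_A,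
        PySem.Set.ofList_eq_foldl, List.foldl, PySem.Set.add, PySem.Set.contains] <;>
      simp_all [eq_comm]
  · simp [h3]

-- ===== VERDICT (by name: the statement is the Claim_ definition above) =====
theorem check_group1_spec : Claim_equal_check_group1 := by
  intro group _ hpre
  unfold Spec_check_group1
  exact pv_main group hpre
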